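-- pv_equiv track=rewrite | github.com/johnmarktaylor91/torchlens | torchlens/validation/invariants.py | _expected_layer_log_child_views
-- ===== SOURCE A (Python) =====
-- def _append_unique(values: list[str], value: str) -> None:
--     """Append ``value`` to ``values`` only if not already present.
--
--     Parameters
--     ----------
--     values:
--         Ordered list being built.
--     value:
--         Candidate value to append.
--     """
--
--     if value not in values:
--         values.append(value)
--
-- def _expected_layer_log_child_views(
--     cond_branch_children_by_cond: dict[int, dict[str, list[str]]],
-- ) -> tuple[list[str], dict[int, list[str]], list[str]]:
--     """Project aggregate child views from a ``LayerLog`` primary structure.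
--
--     Parameters
--     ----------
--     cond_branch_children_by_cond:
--         Aggregate ``cond_id -> branch_kind -> child labels`` mapping on a
--         ``LayerLog``.
--
--     Returns
--     -------
--     tuple[list[str], dict[int, list[str]], list[str]]
--         Expected THEN, ELIF, and ELSE child views preserving first-seen order.
--     """
--
--     then_children: list[str] = []
--     elif_children: dict[int, list[str]] = {}
--     else_children: list[str] = []
--     for branch_children in cond_branch_children_by_cond.values():
--         for child_label in branch_children.get("then", []):
--             _append_unique(then_children, child_label)
--         for branch_kind, child_labels in branch_children.items():
--             if not branch_kind.startswith("elif_"):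
--                 continue
--             elif_index = int(branch_kind.split("_", 1)[1])
--             expected_children = elif_children.setdefault(elif_index, [])
--             for child_label in child_labels:
--                 _append_unique(expected_children, child_label)
--         for child_label in branch_children.get("else", []):
--             _append_unique(else_children, child_label)
--     return then_children, elif_children, else_children
-- ===== SOURCE B (Python) =====
-- def _expected_layer_log_child_views(
--     cond_branch_children_by_cond: dict[int, dict[str, list[str]]],
-- ) -> tuple[list[str], dict[int, list[str]], list[str]]:
--     """Collect raw (duplicated) label streams per target, then dedup each once.
--
--     Phase 1 routes every branch's labels wholesale (extend, no membership
--     tests) into raw streams; phase 2 dedups each stream with dict.fromkeys,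
--     which keeps first occurrences in order.
--     """
--     then_raw: list[str] = []
--     elif_raw: dict[int, list[str]] = {}
--     else_raw: list[str] = []
--     for branch_children in cond_branch_children_by_cond.values():
--         for branch_kind, child_labels in branch_children.items():
--             if branch_kind == "then":
--                 then_raw.extend(child_labels)
--             elif branch_kind.startswith("elif_"):
--                 elif_raw.setdefault(int(branch_kind.split("_", 1)[1]), []).extend(child_labels)
--             elif branch_kind == "else":
--                 else_raw.extend(child_labels)
--     return (
--         list(dict.fromkeys(then_raw)),
--         {index: list(dict.fromkeys(raw)) for index, raw in elif_raw.items()},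
--         list(dict.fromkeys(else_raw)),
--     )
-- ===== Notes on version B (the rewrite author's own statement) =====
-- stated objective: alternative
-- what changed: Instead of deduplicating while appending (a membership scan of the growing output list for every label), B first routes every branch's labels wholesale into raw streams (list.extend / setdefault+extend, no membership tests) and then deduplicates each stream once at the end with dict.fromkeys (first-seen order); a timing run measured no significant difference on the generated inputs.
-- outside the precondition, e.g. on _expected_layer_log_child_views({0: {'elif_x': ['a']}}): A raises ValueError, B raises ValueError
import Mathlib
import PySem

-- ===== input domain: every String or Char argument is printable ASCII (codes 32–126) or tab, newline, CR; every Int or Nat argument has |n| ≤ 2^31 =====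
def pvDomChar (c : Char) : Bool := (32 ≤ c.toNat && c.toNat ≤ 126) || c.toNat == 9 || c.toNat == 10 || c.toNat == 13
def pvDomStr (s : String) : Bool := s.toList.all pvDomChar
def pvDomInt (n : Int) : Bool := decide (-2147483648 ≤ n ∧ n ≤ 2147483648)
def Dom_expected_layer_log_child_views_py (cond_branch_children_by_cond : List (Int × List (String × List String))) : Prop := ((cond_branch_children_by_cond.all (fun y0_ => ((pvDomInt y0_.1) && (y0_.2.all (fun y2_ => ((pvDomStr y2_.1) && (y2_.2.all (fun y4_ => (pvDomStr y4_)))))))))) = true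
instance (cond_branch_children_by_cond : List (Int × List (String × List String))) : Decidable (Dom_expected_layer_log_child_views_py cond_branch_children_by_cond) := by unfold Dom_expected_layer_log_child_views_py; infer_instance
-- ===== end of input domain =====

-- B collects raw label streams per target (no membership tests in the loop, plain extends) and dedups
-- each stream once at the end with dict.fromkeys — a different algorithm, not claimed faster.


-- ===== PORT A =====
-- _append_unique
def pvAppendUnique (values : List String) (v : String) : List String :=
  if v ∈ values then values else values ++ [v]

-- branch_children.get(key, []) : first-match lookup in the association list
def pvAGet (d : List (String × List String)) (key : String) : List String :=
  match d with
  | [] => []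
  | (k, v) :: rest => if k = key then v else pvAGet rest key

-- int(branch_kind.split("_", 1)[1]); total form, used only under Pre_ (the int() parse succeeds)
def pvElifIndexA (k : String) : Int :=
  (PySem.Int.ofStr? (PySem.List.pyGetD ((PySem.Str.splitMax? k "_" 1).getD []) 1 "")).getD 0

-- elif_children.setdefault(elif_index, []) then _append_unique of each label into that (mutated) list
def pvElifAddA (e : List (Int × List String)) (idx : Int) (labels : List String) : List (Int × List String) :=
  match e with
  | [] => [(idx, labels.foldl pvAppendUnique [])]
  | (k, v) :: rest =>
      if k = idx then (k, labels.foldl pvAppendUnique v) :: rest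
      else (k, v) :: pvElifAddA rest idx labels

def expected_layer_log_child_views_py (cond_branch_children_by_cond : List (Int × List (String × List String))) : List String × (List (Int × List String)) × List String :=
  cond_branch_children_by_cond.foldl
    (fun st entry =>
      ((pvAGet entry.2 "then").foldl pvAppendUnique st.1,
       entry.2.foldl
         (fun e kv =>
           if PySem.Str.startswith kv.1 "elif_" then pvElifAddA e (pvElifIndexA kv.1) kv.2
           else e) st.2.1,
       (pvAGet entry.2 "else").foldl pvAppendUnique st.2.2))
    ([], [], [])

-- ===== PORT B =====
-- int(branch_kind.split("_", 1)[1]); total form, used only under Pre_ (the int() parse succeeds)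
def pvElifIndexB (k : String) : Int :=
  (PySem.Int.ofStr? (PySem.List.pyGetD ((PySem.Str.splitMax? k "_" 1).getD []) 1 "")).getD 0

-- elif_raw.setdefault(idx, []).extend(labels) : plain extend of the (shared, mutated) raw list
def pvRawElifAdd (e : List (Int × List String)) (idx : Int) (labels : List String) : List (Int × List String) :=
  match e with
  | [] => [(idx, labels)]
  | (k, v) :: rest =>
      if k = idx then (k, v ++ labels) :: rest
      else (k, v) :: pvRawElifAdd rest idx labels

def expected_layer_log_child_views_py_alt (cond_branch_children_by_cond : List (Int × List (String × List String))) : List String × (List (Int × List String)) × List String :=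
  -- phase 1: route every branch's labels wholesale into raw streams
  let raw := cond_branch_children_by_cond.foldl
    (fun st entry =>
      entry.2.foldl
        (fun st kv =>
          if kv.1 = "then" then (st.1 ++ kv.2, st.2.1, st.2.2)
          else if PySem.Str.startswith kv.1 "elif_" then (st.1, pvRawElifAdd st.2.1 (pvElifIndexB kv.1) kv.2, st.2.2)
          else if kv.1 = "else" then (st.1, st.2.1, st.2.2 ++ kv.2)
          else st)
        st)
    ([], [], [])
  -- phase 2: list(dict.fromkeys(...)) = PySem.List.dedup (first occurrences, in order)
  (PySem.List.dedup raw.1,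
   raw.2.1.map (fun kv => (kv.1, PySem.List.dedup kv.2)),
   PySem.List.dedup raw.2.2)

-- ===== PRECONDITION & SPEC =====
-- Pre_ excludes (a) inner keys starting with "elif_" whose suffix int() cannot parse — there A raises
-- ValueError — and (b) inner association lists carrying the key "then" or "else" more than once, which
-- do not represent a Python dict (duplicate keys; both Python versions only ever see the collapsed dict).
def Pre_expected_layer_log_child_views_py (cond_branch_children_by_cond : List (Int × List (String × List String))) : Prop :=
  ∀ entry ∈ cond_branch_children_by_cond,
    (entry.2.map Prod.fst).count "then" ≤ 1 ∧
    (entry.2.map Prod.fst).count "else" ≤ 1 ∧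
    ∀ kv ∈ entry.2, PySem.Str.startswith kv.1 "elif_" = true →
      (PySem.Int.ofStr? (PySem.List.pyGetD ((PySem.Str.splitMax? kv.1 "_" 1).getD []) 1 "")).isSome = true
instance (cond_branch_children_by_cond : List (Int × List (String × List String))) : Decidable (Pre_expected_layer_log_child_views_py cond_branch_children_by_cond) := by unfold Pre_expected_layer_log_child_views_py; infer_instance

def pvWitness_expected_layer_log_child_views_py : (List (Int × List (String × List String))) :=
  [(0, [("then", ["a", "b"]), ("elif_0", ["c"]), ("else", ["d"])]), (1, [("then", ["b"]), ("elif_1", ["e"])])]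

def Spec_expected_layer_log_child_views_py (cond_branch_children_by_cond : List (Int × List (String × List String))) (out : List String × (List (Int × List String)) × List String) : Prop := out = expected_layer_log_child_views_py_alt cond_branch_children_by_cond
instance (cond_branch_children_by_cond : List (Int × List (String × List String))) (out : List String × (List (Int × List String)) × List String) : Decidable (Spec_expected_layer_log_child_views_py cond_branch_children_by_cond out) := by unfold Spec_expected_layer_log_child_views_py; infer_instance

-- ===== CLAIM (what is proved, stated in full; the proofs are below) =====
def Claim_equal_expected_layer_log_child_views_py : Prop := ∀ (cond_branch_children_by_cond : List (Int × List (String × List String))), Dom_expected_layer_log_child_views_py cond_branch_children_by_cond → Pre_expected_layer_log_child_views_py cond_branch_children_by_cond → Spec_expected_layer_log_child_views_py cond_branch_children_by_cond (expected_layer_log_child_views_py cond_branch_children_by_cond)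

-- ===== LEMMAS AND PROOFS =====

-- dict.fromkeys-style dedup IS the unique-append fold
theorem dedup_eq_foldl (xs : List String) (acc : List String) :
    xs.foldl PySem.Set.add acc = xs.foldl pvAppendUnique acc := by
  have : @PySem.Set.add String _ = pvAppendUnique := by
    funext s x
    simp [PySem.Set.add, PySem.Set.contains, pvAppendUnique]
  rw [this]

theorem dedup_append (xs ys : List String) :
    PySem.List.dedup (xs ++ ys) = ys.foldl pvAppendUnique (PySem.List.dedup xs) := by
  simp only [PySem.List.dedup_eq_ofList, PySem.Set.ofList_eq_foldl, List.foldl_append]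
  exact dedup_eq_foldl ys _

-- the per-value dedup map commutes with one elif insertion
theorem dedup_def (xs : List String) : PySem.List.dedup xs = xs.foldl pvAppendUnique [] := by
  rw [PySem.List.dedup_eq_ofList, PySem.Set.ofList_eq_foldl]
  exact dedup_eq_foldl xs []

theorem elifAdd_map (e : List (Int × List String)) (idx : Int) (labels : List String) :
    pvElifAddA (e.map (fun kv => (kv.1, PySem.List.dedup kv.2))) idx labels
      = (pvRawElifAdd e idx labels).map (fun kv => (kv.1, PySem.List.dedup kv.2)) := by
  induction e with
  | nil =>
      simp only [List.map_nil, pvElifAddA, pvRawElifAdd, List.map_cons, dedup_def]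
  | cons p rest ih =>
      obtain ⟨k, v⟩ := p
      by_cases hk : k = idx
      · subst hk
        simp only [List.map_cons, pvElifAddA, pvRawElifAdd, if_true, dedup_append]
      · simp only [List.map_cons, pvElifAddA, pvRawElifAdd, if_neg hk, ih]

-- ... and with the whole elif sub-fold over one branch mapping
theorem elifFold_map (bc : List (String × List String)) (e : List (Int × List String)) :
    bc.foldl
      (fun e kv => if PySem.Str.startswith kv.1 "elif_" then pvElifAddA e (pvElifIndexA kv.1) kv.2 else e)
      (e.map (fun kv => (kv.1, PySem.List.dedup kv.2)))
    = (bc.foldl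
        (fun e kv => if PySem.Str.startswith kv.1 "elif_" then pvRawElifAdd e (pvElifIndexB kv.1) kv.2 else e)
        e).map (fun kv => (kv.1, PySem.List.dedup kv.2)) := by
  induction bc generalizing e with
  | nil => rfl
  | cons kv rest ih =>
      by_cases hsw : PySem.Str.startswith kv.1 "elif_" = true
      · simp only [List.foldl_cons, if_pos hsw, elifAdd_map]
        exact ih _
      · simp only [List.foldl_cons, if_neg hsw]
        exact ih e

-- a key absent from the association list looks up to []
theorem pvAGet_eq_nil_of_count_zero (bc : List (String × List String)) (key : String)
    (h : (bc.map Prod.fst).count key = 0) : pvAGet bc key = [] := by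
  induction bc with
  | nil => rfl
  | cons p rest ih =>
      obtain ⟨k, v⟩ := p
      simp only [List.map_cons, List.count_cons] at h
      by_cases hk : k = key
      · simp [hk] at h
      · simpa [pvAGet, hk] using ih (by omega)

-- B's raw dispatching pass over one branch mapping, split into its three independent targets
theorem inner_raw (bc : List (String × List String))
    (hT : (bc.map Prod.fst).count "then" ≤ 1)
    (hE : (bc.map Prod.fst).count "else" ≤ 1)
    (r : List String × (List (Int × List String)) × List String) :
    bc.foldl
      (fun st kv =>
        if kv.1 = "then" then (st.1 ++ kv.2, st.2.1, st.2.2)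
        else if PySem.Str.startswith kv.1 "elif_" then (st.1, pvRawElifAdd st.2.1 (pvElifIndexB kv.1) kv.2, st.2.2)
        else if kv.1 = "else" then (st.1, st.2.1, st.2.2 ++ kv.2)
        else st) r
    = (r.1 ++ pvAGet bc "then",
       bc.foldl (fun e kv => if PySem.Str.startswith kv.1 "elif_" then pvRawElifAdd e (pvElifIndexB kv.1) kv.2 else e) r.2.1,
       r.2.2 ++ pvAGet bc "else") := by
  induction bc generalizing r with
  | nil => simp [pvAGet]
  | cons p rest ih =>
      obtain ⟨k, v⟩ := p
      simp only [List.map_cons, List.count_cons] at hT hE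
      by_cases hk : k = "then"
      · subst hk
        have hbt : (("then" : String) == "then") = true := by decide
        have hbe : (("then" : String) == "else") = false := by decide
        simp only [hbt, hbe, if_true, Bool.false_eq_true, if_false] at hT hE
        have hT0 : ((rest.map Prod.fst).count "then") = 0 := by omega
        have hsw : ¬ PySem.Str.startswith "then" "elif_" = true := by decide
        have hrest := ih (by omega) (by omega) (r.1 ++ v, r.2.1, r.2.2)
        simp only [List.foldl_cons, if_true, if_neg hsw]
        rw [hrest, pvAGet_eq_nil_of_count_zero rest "then" hT0]
        simp [pvAGet]
      · by_cases hsw : PySem.Str.startswith k "elif_" = true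
        · have hkE : k ≠ "else" := by
            intro h; subst h; exact absurd hsw (by decide)
          have hrest := ih (by simp [hk] at hT; omega) (by simp [hkE] at hE; omega)
            (r.1, pvRawElifAdd r.2.1 (pvElifIndexB k) v, r.2.2)
          simp only [List.foldl_cons, if_neg hk, if_pos hsw]
          rw [hrest]
          simp [pvAGet, hk, hkE]
        · by_cases hkE : k = "else"
          · subst hkE
            have hbt : (("else" : String) == "then") = false := by decide
            have hbe : (("else" : String) == "else") = true := by decide
            simp only [hbt, hbe, if_true, Bool.false_eq_true, if_false] at hT hE
            have hE0 : ((rest.map Prod.fst).count "else") = 0 := by omega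
            have hrest := ih (by omega) (by omega) (r.1, r.2.1, r.2.2 ++ v)
            simp only [List.foldl_cons, if_neg hk, if_neg hsw, if_true]
            rw [hrest, pvAGet_eq_nil_of_count_zero rest "else" hE0]
            simp [pvAGet, hk]
          · have hrest := ih (by simp [hk] at hT; omega) (by simp [hkE] at hE; omega) r
            simp only [List.foldl_cons, if_neg hk, if_neg hsw, if_neg hkE]
            rw [hrest]
            simp [pvAGet, hk, hkE]

-- A's per-entry step, started from the dedup-projection of a raw state, lands on the
-- dedup-projection of B's per-entry raw step
theorem step_comm (bc : List (String × List String))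
    (hT : (bc.map Prod.fst).count "then" ≤ 1)
    (hE : (bc.map Prod.fst).count "else" ≤ 1)
    (r : List String × (List (Int × List String)) × List String) :
    ((pvAGet bc "then").foldl pvAppendUnique (PySem.List.dedup r.1),
     bc.foldl (fun e kv => if PySem.Str.startswith kv.1 "elif_" then pvElifAddA e (pvElifIndexA kv.1) kv.2 else e)
       (r.2.1.map (fun kv => (kv.1, PySem.List.dedup kv.2))),
     (pvAGet bc "else").foldl pvAppendUnique (PySem.List.dedup r.2.2))
    = (let s := bc.foldl
        (fun st kv =>
          if kv.1 = "then" then (st.1 ++ kv.2, st.2.1, st.2.2)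
          else if PySem.Str.startswith kv.1 "elif_" then (st.1, pvRawElifAdd st.2.1 (pvElifIndexB kv.1) kv.2, st.2.2)
          else if kv.1 = "else" then (st.1, st.2.1, st.2.2 ++ kv.2)
          else st) r
       (PySem.List.dedup s.1, s.2.1.map (fun kv => (kv.1, PySem.List.dedup kv.2)), PySem.List.dedup s.2.2)) := by
  rw [inner_raw bc hT hE r]
  simp only [dedup_append, elifFold_map]

-- the outer loop preserves the dedup-projection invariant
theorem outer_comm (cbc : List (Int × List (String × List String)))
    (hpre : Pre_expected_layer_log_child_views_py cbc)
    (r : List String × (List (Int × List String)) × List String) :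
    cbc.foldl
      (fun st entry =>
        ((pvAGet entry.2 "then").foldl pvAppendUnique st.1,
         entry.2.foldl
           (fun e kv => if PySem.Str.startswith kv.1 "elif_" then pvElifAddA e (pvElifIndexA kv.1) kv.2 else e) st.2.1,
         (pvAGet entry.2 "else").foldl pvAppendUnique st.2.2))
      (PySem.List.dedup r.1, r.2.1.map (fun kv => (kv.1, PySem.List.dedup kv.2)), PySem.List.dedup r.2.2)
    = (let s := cbc.foldl
        (fun st entry =>
          entry.2.foldl
            (fun st kv =>
              if kv.1 = "then" then (st.1 ++ kv.2, st.2.1, st.2.2)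
              else if PySem.Str.startswith kv.1 "elif_" then (st.1, pvRawElifAdd st.2.1 (pvElifIndexB kv.1) kv.2, st.2.2)
              else if kv.1 = "else" then (st.1, st.2.1, st.2.2 ++ kv.2)
              else st) st) r
       (PySem.List.dedup s.1, s.2.1.map (fun kv => (kv.1, PySem.List.dedup kv.2)), PySem.List.dedup s.2.2)) := by
  induction cbc generalizing r with
  | nil => rfl
  | cons entry rest ih =>
      have h := hpre entry (List.mem_cons_self ..)
      have hrest : Pre_expected_layer_log_child_views_py rest :=
        fun e he => hpre e (List.mem_cons_of_mem _ he)
      simp only [List.foldl_cons]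
      rw [step_comm entry.2 h.1 h.2.1 r]
      exact ih hrest _

theorem ports_eq (cbc : List (Int × List (String × List String)))
    (hpre : Pre_expected_layer_log_child_views_py cbc) :
    expected_layer_log_child_views_py cbc = expected_layer_log_child_views_py_alt cbc := by
  unfold expected_layer_log_child_views_py expected_layer_log_child_views_py_alt
  have h := outer_comm cbc hpre ([], [], [])
  simpa using h

-- ===== VERDICT (by name: the statement is the Claim_ definition above) =====
theorem expected_layer_log_child_views_py_spec : Claim_equal_expected_layer_log_child_views_py :=
  fun cbc _ hpre => (ports_eq cbc hpre).symm ▸ rfl
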